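-- pv_equiv track=rewrite | github.com/OColkesen/python-programming | colorful_tiles.py | min_tiles_to_change
-- ===== SOURCE A (Python) =====
-- def min_tiles_to_change(room):
--     """
--     Returns the minimal number of tiles that need to be changed to make the
--     given room as colorful as possible.
--
--     The goal is to achieve a tile configuration where no two adjacent tiles are
--     the same color.
--
--     Parameters:
--         room - a string containing the colors of the tiles in the room. The i^th
--                character of room (one of 'R', 'G', 'B', or 'Y') is the color of
--                the i^th tile.
--
--     Returns:
--         The minimum number of tiles that need to be changed so that no two
--         neighboring tiles are the same color.
--     """
--
--     # Since there are 4 colors and a main tile and two adjacent tiles correspond to 3 tiles, specific colors are not important.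
--     # Instead, all we care about is how many pairs of the same colors are next to each other.
--     # Therefore, if we change one of the pairs with a random available color, we will be getting rid of same adjacent colors.
--     count = 0
--     i = 0
--
--     while i < len(room): #I preferred a while loop because I needed to skip the next letter if the two values are the same.
--                          #(i.e. index 0 and 1 are equal in "RRRR" so they are one pair. I continue with index 3 to find a new pair.
--         if i != len(room)-1: #the conditional is to get rid of the out of range error.
--             if room[i] == room[i+1]:
--                 i += 2
--                 count += 1
--             else:
--                 i += 1
--         else:
--             i += 1
--
--     return count
-- ===== SOURCE B (Python) =====
-- from itertools import groupby
--
--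
-- def min_tiles_to_change(room):
--     # Split the room into maximal runs of equal consecutive colors;
--     # a run of length L needs L // 2 changes.
--     return sum(len(list(g)) // 2 for _, g in groupby(room))
-- ===== Notes on version B (the rewrite author's own statement) =====
-- stated objective: simpler
-- what changed: Replaces the index-advancing while loop that pairs and skips with a run-length decomposition via itertools.groupby, summing length // 2 over each maximal run of equal colors.
import Mathlib
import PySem

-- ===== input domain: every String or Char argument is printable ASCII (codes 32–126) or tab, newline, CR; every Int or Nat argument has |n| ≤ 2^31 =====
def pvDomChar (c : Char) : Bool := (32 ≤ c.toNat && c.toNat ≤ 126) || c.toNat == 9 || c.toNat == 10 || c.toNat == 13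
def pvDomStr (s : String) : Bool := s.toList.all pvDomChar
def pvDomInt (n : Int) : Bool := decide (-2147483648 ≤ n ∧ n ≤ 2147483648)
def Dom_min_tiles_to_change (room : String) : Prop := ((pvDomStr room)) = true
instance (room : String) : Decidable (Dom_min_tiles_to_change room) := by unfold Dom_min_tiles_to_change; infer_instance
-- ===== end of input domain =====

-- B replaces A's pair-and-skip while loop with a run-length decomposition summing len(run) // 2 — objective: simpler.

-- ===== PORT A =====
-- A's while loop over index i: if i is not the last index and room[i] == room[i+1],
-- advance i by 2 and count; otherwise advance by 1. Transliterated as structural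
-- recursion on the remaining suffix with the count accumulator.
def pvLoopA (count : Int) : List Char → Int
  | [] => count
  | [_] => count
  | a :: b :: t => if a == b then pvLoopA (count + 1) t else pvLoopA count (b :: t)

def min_tiles_to_change (room : String) : Int := pvLoopA 0 room.toList

-- ===== PORT B =====
-- Lengths of the maximal runs of equal consecutive characters (itertools.groupby).
def pvRunLens : List Char → List Nat
  | [] => []
  | a :: t => (1 + (t.takeWhile (· == a)).length) :: pvRunLens (t.dropWhile (· == a))
termination_by xs => xs.length
decreasing_by
  simp only [List.length_cons]
  exact Nat.lt_succ_of_le (List.length_dropWhile_le _ _)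

-- sum(len(run) // 2 for each run); lengths are nonnegative, so Nat division is Python's //.
def min_tiles_to_change_alt (room : String) : Int :=
  (((pvRunLens room.toList).map (fun n => n / 2)).sum : Nat)

-- ===== PRECONDITION & SPEC =====
def Spec_min_tiles_to_change (room : String) (out : Int) : Prop := out = min_tiles_to_change_alt room
instance (room : String) (out : Int) : Decidable (Spec_min_tiles_to_change room out) := by unfold Spec_min_tiles_to_change; infer_instance

-- ===== CLAIM (what is proved, stated in full; the proofs are below) =====
def Claim_equal_min_tiles_to_change : Prop := ∀ (room : String), Dom_min_tiles_to_change room → Spec_min_tiles_to_change room (min_tiles_to_change room)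

-- ===== LEMMAS AND PROOFS =====

theorem pvRunLens_cons (a : Char) (t : List Char) :
    pvRunLens (a :: t) = (1 + (t.takeWhile (· == a)).length) :: pvRunLens (t.dropWhile (· == a)) := by
  rw [pvRunLens.eq_def]

-- B's value on a character list, in Nat.
def pvS (xs : List Char) : Nat := ((pvRunLens xs).map (fun n => n / 2)).sum

theorem pvS_nil : pvS [] = 0 := by simp [pvS, pvRunLens]

theorem pvS_cons (a : Char) (t : List Char) :
    pvS (a :: t) = (1 + (t.takeWhile (· == a)).length) / 2 + pvS (t.dropWhile (· == a)) := by
  simp [pvS, pvRunLens_cons]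

-- A leading character different from the next starts a run of length 1, contributing 0.
theorem pvS_neq (a b : Char) (t : List Char) (h : a ≠ b) :
    pvS (a :: b :: t) = pvS (b :: t) := by
  have hb : (b == a) = false := by simp; exact fun e => h e.symm
  rw [pvS_cons]
  simp [hb]

-- Two equal leading characters contribute exactly one change.
theorem pvS_eq (a : Char) (t : List Char) :
    pvS (a :: a :: t) = 1 + pvS t := by
  cases t with
  | nil => simp [pvS_cons, pvS_nil]
  | cons c t' =>
    by_cases hc : c = a
    · subst hc
      rw [pvS_cons, pvS_cons]
      simp only [List.takeWhile_cons, List.dropWhile_cons, beq_self_eq_true, if_true,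
        List.length_cons]
      omega
    · have hc' : (c == a) = false := by simp [hc]
      rw [pvS_cons]
      simp only [List.takeWhile_cons, List.dropWhile_cons, beq_self_eq_true, hc',
        Bool.false_eq_true, if_true, if_false, List.length_cons, List.length_nil]

theorem pvLoopA_eq_pvS : ∀ (n : Nat) (xs : List Char), xs.length ≤ n →
    ∀ c : Int, pvLoopA c xs = c + (pvS xs : Int) := by
  intro n
  induction n with
  | zero =>
    intro xs h c
    have hx : xs = [] := List.length_eq_zero_iff.mp (Nat.le_zero.mp h)
    subst hx; simp [pvLoopA, pvS_nil]
  | succ n ih =>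
    intro xs h c
    match xs with
    | [] => simp [pvLoopA, pvS_nil]
    | [a] =>
      have : pvS [a] = 0 := by simp [pvS_cons, pvS_nil]
      simp [pvLoopA, this]
    | a :: b :: t =>
      simp only [List.length_cons] at h
      by_cases hab : a = b
      · subst hab
        have hlen : t.length ≤ n := by omega
        rw [pvLoopA]
        simp only [beq_self_eq_true, if_true]
        rw [ih t hlen (c + 1), pvS_eq]
        push_cast; ring
      · have hab' : (a == b) = false := by simp [hab]
        have hlen : (b :: t).length ≤ n := by simp; omega
        rw [pvLoopA]
        simp only [hab', Bool.false_eq_true, if_false]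
        rw [ih (b :: t) hlen c, pvS_neq a b t hab]

-- ===== VERDICT (by name: the statement is the Claim_ definition above) =====
theorem min_tiles_to_change_spec : Claim_equal_min_tiles_to_change := by
  intro room _
  show min_tiles_to_change room = min_tiles_to_change_alt room
  have h := pvLoopA_eq_pvS room.toList.length room.toList (le_refl _) 0
  simp only [min_tiles_to_change, min_tiles_to_change_alt, h, pvS]
  ring
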